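-- pv_equiv track=rewrite | github.com/lafintiger/FunWithLLMs | Evaluator/evaluator.py | _split_sessions
-- ===== SOURCE A (Python) =====
-- def _split_sessions(batch_text):
--     """Split batch text into individual sessions"""
--     sessions = []
--     current_session = []
--
--     lines = batch_text.split('\n')
--     in_session = False
--
--     for line in lines:
--         if "###--- SESSION START ---###" in line:
--             in_session = True
--             current_session = []
--         elif "###--- SESSION END ---###" in line:
--             in_session = False
--             if current_session:
--                 sessions.append('\n'.join(current_session))
--         elif in_session:
--             current_session.append(line)
--
--     # Handle case where last session might not have an END marker
--     if in_session and current_session: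
--         sessions.append('\n'.join(current_session))
--
--     return sessions
-- ===== SOURCE B (Python) =====
-- def _split_sessions(batch_text):
--     """Split batch text into individual sessions."""
--     START = "###--- SESSION START ---###"
--     END = "###--- SESSION END ---###"
--
--     def split_at_start(ls):
--         # (lines before the first START line, lines after it, no-START-found flag)
--         for i, l in enumerate(ls):
--             if START in l:
--                 return ls[:i], ls[i + 1:], False
--         return ls, [], True
--
--     sessions = []
--     _, rest, done = split_at_start(batch_text.split('\n'))
--     while not done:
--         seg, rest, done = split_at_start(rest)
--         for i, l in enumerate(seg):
--             if END in l:
--                 if i: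
--                     sessions.append('\n'.join(seg[:i]))
--                 break
--         else:
--             if done and seg:
--                 sessions.append('\n'.join(seg))
--     return sessions
-- ===== Notes on version B (the rewrite author's own statement) =====
-- stated objective: alternative
-- what changed: Replaced A's single stateful scan with an in_session flag by a partition-first decomposition: split the line list at START-marker lines, then emit each segment's lines before its first END marker.
-- intended difference: On inputs where some segment between START markers has a non-empty body followed by two or more END-marker lines, A re-appends the stale session body once per extra END line (e.g. ['x','x']) because it never clears current_session after emitting, while B emits the session once (['x']), which is the intended one-session-per-START behaviour. — e.g. on _split_sessions("###--- SESSION START ---###\nx\n###--- SESSION END ---###\n###--- SESSION END ---###"): A returns ["x", "x"], B returns ["x"]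
import Mathlib
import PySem

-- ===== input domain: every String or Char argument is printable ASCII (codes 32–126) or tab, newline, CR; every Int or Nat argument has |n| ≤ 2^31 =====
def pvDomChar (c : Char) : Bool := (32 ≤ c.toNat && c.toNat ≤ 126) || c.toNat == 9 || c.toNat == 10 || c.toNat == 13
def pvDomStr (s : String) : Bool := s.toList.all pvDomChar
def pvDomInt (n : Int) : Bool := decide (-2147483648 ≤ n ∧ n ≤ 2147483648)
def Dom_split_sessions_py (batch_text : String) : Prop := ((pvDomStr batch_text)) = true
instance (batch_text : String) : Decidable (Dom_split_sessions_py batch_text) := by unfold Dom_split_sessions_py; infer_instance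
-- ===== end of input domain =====

-- B replaces A's single stateful in_session scan by a partition-first decomposition
-- (split the line list at START-marker lines, then emit each segment's lines before its
-- first END marker); objective: alternative structure, same linear cost.

-- shared marker tests ('marker in line' substring test, as in both Pythons)
def pvHasStart (l : String) : Bool := PySem.Str.isIn "###--- SESSION START ---###" l
def pvHasEnd (l : String) : Bool := PySem.Str.isIn "###--- SESSION END ---###" l
def pvJoin (ls : List String) : String := PySem.Str.join "\n" ls
-- batch_text.split('\n'): the separator is the nonempty literal "\n", so split? is always `some`
def pvLines (s : String) : List String := (PySem.Str.split? s "\n").getD []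

-- ===== PORT A =====
-- literal port of A's for-loop: state (sessions, current_session, in_session)
def pvALoop (lines sessions cur : List String) (ins : Bool) : List String :=
  match lines with
  | [] => if ins && !cur.isEmpty then sessions ++ [pvJoin cur] else sessions
  | l :: tl =>
    if pvHasStart l then pvALoop tl sessions [] true
    else if pvHasEnd l then
      pvALoop tl (if !cur.isEmpty then sessions ++ [pvJoin cur] else sessions) cur false
    else if ins then pvALoop tl sessions (cur ++ [l]) true
    else pvALoop tl sessions cur ins

def split_sessions_py (batch_text : String) : List String :=
  pvALoop (pvLines batch_text) [] [] false

-- ===== PORT B =====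
-- Source B's split_at_start: (lines before the first START line, lines after it, no-START flag)
def pvBSplitAtStart (ls : List String) : List String × List String × Bool :=
  match ls with
  | [] => ([], [], true)
  | l :: tl =>
    if pvHasStart l then ([], tl, false)
    else
      let r := pvBSplitAtStart tl
      (l :: r.1, r.2.1, r.2.2)

-- termination measure for the while loop: the remainder is strictly shorter when a START was found
theorem pvBSplit_len_lt : ∀ ls : List String, (pvBSplitAtStart ls).2.2 = false →
    (pvBSplitAtStart ls).2.1.length < ls.length := by
  intro ls
  induction ls with
  | nil => simp [pvBSplitAtStart]
  | cons l tl ih =>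
    by_cases hs : pvHasStart l = true
    · simp [pvBSplitAtStart, hs]
    · intro h
      simp only [pvBSplitAtStart, hs, if_neg, Bool.false_eq_true, not_false_eq_true,
        List.length_cons] at h ⊢
      have := ih h
      omega

-- Source B's inner for/else over a segment: body collected so far, `done` = the while loop's flag
def pvBScan (seg body : List String) (done : Bool) : List String :=
  match seg with
  | [] => if done && !body.isEmpty then [pvJoin body] else []   -- for-else branch (seg had no END)
  | l :: tl =>
    if pvHasEnd l then (if body.isEmpty then [] else [pvJoin body])   -- break at the first END
    else pvBScan tl (body ++ [l]) done

-- Source B's while loop, one iteration per recursive call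
def pvBLoop (ls : List String) : List String :=
  let r := pvBSplitAtStart ls
  let emitted := pvBScan r.1 [] r.2.2
  if h : r.2.2 = true then emitted else emitted ++ pvBLoop r.2.1
termination_by ls.length
decreasing_by exact pvBSplit_len_lt ls (by simpa using h)

def split_sessions_py_alt (batch_text : String) : List String :=
  let r := pvBSplitAtStart (pvLines batch_text)
  if r.2.2 then [] else pvBLoop r.2.1

-- ===== PRECONDITION & SPEC =====
-- On inputs where some segment after a START line has a non-empty body followed by two or more
-- END-marker lines, A re-appends the stale session body once per extra END line (it never clears
-- current_session after emitting), while B emits the session once — the intended behaviour.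
def D_split_sessions_py (batch_text : String) : Prop :=
  let L := pvLines batch_text
  ∃ i < L.length, pvHasStart (L.getD i "") ∧ ¬ pvHasEnd (L.getD (i + 1) "") ∧
    2 ≤ ((L.drop (i + 1)).takeWhile (fun l => !pvHasStart l)).countP pvHasEnd
instance (batch_text : String) : Decidable (D_split_sessions_py batch_text) := by
  unfold D_split_sessions_py; infer_instance

def Spec_split_sessions_py (batch_text : String) (out : List String) : Prop :=
  ¬ D_split_sessions_py batch_text → out = split_sessions_py_alt batch_text
instance (batch_text : String) (out : List String) : Decidable (Spec_split_sessions_py batch_text out) := by unfold Spec_split_sessions_py; infer_instance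

def pvDiffWitness_split_sessions_py : String :=
  "###--- SESSION START ---###\nx\n###--- SESSION END ---###\n###--- SESSION END ---###"
def pvDiffWitnessOut_split_sessions_py : (List String) × (List String) := (["x", "x"], ["x"])

-- ===== CLAIM (what is proved, stated in full; the proofs are below) =====
def Claim_unchanged_split_sessions_py : Prop := ∀ (batch_text : String), Dom_split_sessions_py batch_text → Spec_split_sessions_py batch_text (split_sessions_py batch_text)
def Claim_exact_split_sessions_py : Prop := ∀ (batch_text : String), Dom_split_sessions_py batch_text → D_split_sessions_py batch_text → split_sessions_py batch_text ≠ split_sessions_py_alt batch_text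
def Claim_changed_split_sessions_py : Prop := Dom_split_sessions_py (pvDiffWitness_split_sessions_py) ∧ D_split_sessions_py (pvDiffWitness_split_sessions_py) ∧ split_sessions_py (pvDiffWitness_split_sessions_py) = pvDiffWitnessOut_split_sessions_py.1 ∧ split_sessions_py_alt (pvDiffWitness_split_sessions_py) = pvDiffWitnessOut_split_sessions_py.2 ∧ pvDiffWitnessOut_split_sessions_py.1 ≠ pvDiffWitnessOut_split_sessions_py.2

-- ===== LEMMAS AND PROOFS =====

-- equation lemmas (controlled unfolding)
theorem pvALoop_nil (s c : List String) (ins : Bool) :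
    pvALoop [] s c ins = if ins && !c.isEmpty then s ++ [pvJoin c] else s := rfl

theorem pvALoop_cons (l : String) (tl s c : List String) (ins : Bool) :
    pvALoop (l :: tl) s c ins =
      if pvHasStart l then pvALoop tl s [] true
      else if pvHasEnd l then
        pvALoop tl (if !c.isEmpty then s ++ [pvJoin c] else s) c false
      else if ins then pvALoop tl s (c ++ [l]) true
      else pvALoop tl s c ins := rfl

theorem pvBSplit_nil : pvBSplitAtStart [] = ([], [], true) := rfl

theorem pvBSplit_cons (l : String) (tl : List String) :
    pvBSplitAtStart (l :: tl) =
      if pvHasStart l then ([], tl, false)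
      else (l :: (pvBSplitAtStart tl).1, (pvBSplitAtStart tl).2.1, (pvBSplitAtStart tl).2.2) := by
  by_cases hs : pvHasStart l = true <;> simp only [pvBSplitAtStart, hs] <;> simp [hs]

-- A's loop only ever appends to `sessions`: factor the accumulator out
theorem pvALoop_prefix (ls : List String) : ∀ (s c : List String) (ins : Bool),
    pvALoop ls s c ins = s ++ pvALoop ls [] c ins := by
  induction ls with
  | nil =>
    intro s c ins
    by_cases h : (ins && !c.isEmpty) = true <;> simp [pvALoop_nil, h]
  | cons l tl ih =>
    intro s c ins
    rw [pvALoop_cons, pvALoop_cons]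
    by_cases hs : pvHasStart l = true
    · simp only [hs, if_pos]
      exact ih s [] true
    · by_cases he : pvHasEnd l = true
      · simp only [hs, he, Bool.false_eq_true, not_false_eq_true, if_neg, if_pos]
        by_cases hc : c.isEmpty = true
        · simp only [hc, Bool.not_true, Bool.false_eq_true, if_neg]
          exact ih s c false
        · simp only [hc, Bool.not_false, if_pos, Bool.not_eq_true'] at *
          rw [ih (s ++ [pvJoin c]) c false, ih ([] ++ [pvJoin c]) c false]
          simp
      · by_cases hi : ins = true
        · simp only [hs, he, hi, Bool.false_eq_true, not_false_eq_true, if_neg, if_pos]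
          exact ih s (c ++ [l]) true
        · simp only [hs, he, hi, Bool.false_eq_true, not_false_eq_true, if_neg]
          exact ih s c false

-- proof-side characterisation of what A's loop emits after the first START: per segment,
-- one copy of the body per END marker in the segment (A never clears current_session)
def pvAChar (ls : List String) : List String :=
  let r := pvBSplitAtStart ls
  let seg := r.1
  let nE := (seg.filter pvHasEnd).length
  let emitted :=
    if 0 < nE then
      let body := seg.takeWhile (fun l => !pvHasEnd l)
      if body.isEmpty then [] else List.replicate nE (pvJoin body)
    else if r.2.2 && !seg.isEmpty then [pvJoin seg] else []
  if h : r.2.2 = true then emitted else emitted ++ pvAChar r.2.1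
termination_by ls.length
decreasing_by exact pvBSplit_len_lt ls (by simpa using h)

-- what A's loop produces from the state (in_session = true, current_session = c)
def pvAltGen (c ls : List String) : List String :=
  let r := pvBSplitAtStart ls
  let seg := r.1
  let nE := (seg.filter pvHasEnd).length
  if 0 < nE then
    (let body := c ++ seg.takeWhile (fun l => !pvHasEnd l)
     if body.isEmpty then [] else List.replicate nE (pvJoin body)) ++
      (if r.2.2 then [] else pvAChar r.2.1)
  else if r.2.2 then (if (c ++ seg).isEmpty then [] else [pvJoin (c ++ seg)])
  else pvAChar r.2.1

-- what A's loop produces from the state (in_session = false, current_session = c)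
def pvFGen (c ls : List String) : List String :=
  let r := pvBSplitAtStart ls
  (if c.isEmpty then [] else List.replicate ((r.1.filter pvHasEnd).length) (pvJoin c)) ++
    (if r.2.2 then [] else pvAChar r.2.1)

theorem pvAltGen_nil_eq (ls : List String) : pvAltGen [] ls = pvAChar ls := by
  rw [pvAChar, pvAltGen]
  by_cases hE : 0 < ((pvBSplitAtStart ls).1.filter pvHasEnd).length
  · by_cases hl : (pvBSplitAtStart ls).2.2 = true <;> simp [hE, hl]
  · by_cases hl : (pvBSplitAtStart ls).2.2 = true <;>
      by_cases hseg : (pvBSplitAtStart ls).1.isEmpty = true <;> simp [hE, hl, hseg]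

theorem pvALoop_main (ls : List String) :
    (∀ c, pvALoop ls [] c true = pvAltGen c ls) ∧
    (∀ c, pvALoop ls [] c false = pvFGen c ls) := by
  induction ls with
  | nil =>
    constructor <;> intro c <;>
      by_cases hc : c.isEmpty = true <;>
        simp [pvALoop_nil, pvAltGen, pvFGen, pvBSplit_nil, hc]
  | cons l tl ih =>
    obtain ⟨ihT, ihF⟩ := ih
    by_cases hs : pvHasStart l = true
    · have hsp : pvBSplitAtStart (l :: tl) = ([], tl, false) := by
        rw [pvBSplit_cons, if_pos hs]
      constructor <;> intro c
      · rw [show pvALoop (l :: tl) [] c true = pvALoop tl [] [] true from by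
            rw [pvALoop_cons, if_pos hs],
          ihT, pvAltGen_nil_eq, pvAltGen, hsp]
        simp
      · rw [show pvALoop (l :: tl) [] c false = pvALoop tl [] [] true from by
            rw [pvALoop_cons, if_pos hs],
          ihT, pvAltGen_nil_eq, pvFGen, hsp]
        simp
    · have hs' : pvHasStart l = false := by simpa using hs
      have hsp : pvBSplitAtStart (l :: tl) =
          (l :: (pvBSplitAtStart tl).1, (pvBSplitAtStart tl).2.1, (pvBSplitAtStart tl).2.2) := by
        rw [pvBSplit_cons]; simp [hs']
      by_cases he : pvHasEnd l = true
      · have key : ∀ c, pvALoop (l :: tl) [] c false =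
            (if c.isEmpty then [] else
              List.replicate (((pvBSplitAtStart tl).1.filter pvHasEnd).length + 1) (pvJoin c)) ++
            (if (pvBSplitAtStart tl).2.2 then [] else pvAChar (pvBSplitAtStart tl).2.1) := by
          intro c
          rw [show pvALoop (l :: tl) [] c false =
              pvALoop tl (if !c.isEmpty then [] ++ [pvJoin c] else []) c false from by
            rw [pvALoop_cons]; simp [hs', he]]
          by_cases hc : c.isEmpty = true
          · rw [show (if !c.isEmpty then [] ++ [pvJoin c] else ([] : List String)) = [] from by
              simp [hc]]
            rw [ihF c, pvFGen]
            simp [hc]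
          · rw [show (if !c.isEmpty then [] ++ [pvJoin c] else ([] : List String)) = [pvJoin c]
              from by simp [hc]]
            rw [pvALoop_prefix, ihF c, pvFGen]
            simp [hc, List.replicate_succ]
        constructor <;> intro c
        · rw [show pvALoop (l :: tl) [] c true = pvALoop (l :: tl) [] c false from by
            rw [pvALoop_cons, pvALoop_cons]; simp [hs', he]]
          rw [key c, pvAltGen, hsp]
          simp [List.filter_cons, he, List.takeWhile_cons]
        · rw [key c, pvFGen, hsp]
          simp [List.filter_cons, he]
      · have he' : pvHasEnd l = false := by simpa using he
        constructor <;> intro c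
        · rw [show pvALoop (l :: tl) [] c true = pvALoop tl [] (c ++ [l]) true from by
            rw [pvALoop_cons]; simp [hs', he']]
          rw [ihT (c ++ [l]), pvAltGen, pvAltGen, hsp]
          simp only [List.filter_cons, he', Bool.false_eq_true, if_neg, not_false_eq_true,
            List.takeWhile_cons, Bool.not_false, if_pos]
          by_cases hE : 0 < ((pvBSplitAtStart tl).1.filter pvHasEnd).length
          · rw [if_pos hE, if_pos hE]
            simp
          · rw [if_neg hE, if_neg hE]
            by_cases hl : (pvBSplitAtStart tl).2.2 = true <;> simp [hl]
        · rw [show pvALoop (l :: tl) [] c false = pvALoop tl [] c false from by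
            rw [pvALoop_cons]; simp [hs', he']]
          rw [ihF c, pvFGen, pvFGen, hsp]
          simp [List.filter_cons, he']

-- B's inner for/else in closed form
theorem pvBScan_char (seg : List String) : ∀ (body : List String) (done : Bool),
    pvBScan seg body done =
      if 0 < ((seg.filter pvHasEnd).length) then
        (if (body ++ seg.takeWhile (fun l => !pvHasEnd l)).isEmpty then []
         else [pvJoin (body ++ seg.takeWhile (fun l => !pvHasEnd l))])
      else if done && !(body ++ seg).isEmpty then [pvJoin (body ++ seg)] else [] := by
  induction seg with
  | nil => intro body done; simp [pvBScan]
  | cons l tl ih =>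
    intro body done
    by_cases he : pvHasEnd l = true
    · simp [pvBScan, he, List.filter_cons, List.takeWhile_cons]
    · have he' : pvHasEnd l = false := by simpa using he
      simp only [pvBScan, he', Bool.false_eq_true, if_false]
      rw [ih (body ++ [l]) done]
      simp [List.filter_cons, he', List.takeWhile_cons, List.append_assoc]

-- the recursive form of the bad-input condition, aligned with the loops
def pvBadRest (ls : List String) : Bool :=
  let r := pvBSplitAtStart ls
  (decide (2 ≤ (r.1.filter pvHasEnd).length) && !(r.1.takeWhile (fun l => !pvHasEnd l)).isEmpty) ||
    (if h : r.2.2 = true then false else pvBadRest r.2.1)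
termination_by ls.length
decreasing_by exact pvBSplit_len_lt ls (by simpa using h)

-- outside the bad condition, A's per-segment replicate collapses to B's single emit
-- per-iteration emissions of the two loops, named for readable unfolding
def pvAEmit (ls : List String) : List String :=
  if 0 < ((pvBSplitAtStart ls).1.filter pvHasEnd).length then
    (if ((pvBSplitAtStart ls).1.takeWhile (fun l => !pvHasEnd l)).isEmpty then []
     else List.replicate ((pvBSplitAtStart ls).1.filter pvHasEnd).length
       (pvJoin ((pvBSplitAtStart ls).1.takeWhile (fun l => !pvHasEnd l))))
  else if (pvBSplitAtStart ls).2.2 && !(pvBSplitAtStart ls).1.isEmpty then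
    [pvJoin (pvBSplitAtStart ls).1] else []

theorem pvAChar_unfold (ls : List String) : pvAChar ls =
    if (pvBSplitAtStart ls).2.2 = true then pvAEmit ls
    else pvAEmit ls ++ pvAChar (pvBSplitAtStart ls).2.1 := by
  rw [pvAChar.eq_def]
  by_cases h : (pvBSplitAtStart ls).2.2 = true <;> simp [h, pvAEmit]

theorem pvBLoop_unfold (ls : List String) : pvBLoop ls =
    if (pvBSplitAtStart ls).2.2 = true then pvBScan (pvBSplitAtStart ls).1 [] (pvBSplitAtStart ls).2.2
    else pvBScan (pvBSplitAtStart ls).1 [] (pvBSplitAtStart ls).2.2 ++ pvBLoop (pvBSplitAtStart ls).2.1 := by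
  rw [pvBLoop.eq_def]
  by_cases h : (pvBSplitAtStart ls).2.2 = true <;> simp [h]

theorem pvBadRest_unfold (ls : List String) : pvBadRest ls =
    ((decide (2 ≤ ((pvBSplitAtStart ls).1.filter pvHasEnd).length) &&
      !((pvBSplitAtStart ls).1.takeWhile (fun l => !pvHasEnd l)).isEmpty) ||
    (if (pvBSplitAtStart ls).2.2 = true then false else pvBadRest (pvBSplitAtStart ls).2.1)) := by
  rw [pvBadRest.eq_def]
  by_cases h : (pvBSplitAtStart ls).2.2 = true <;> simp [h]

-- outside the bad condition, A's per-segment replicate collapses to B's single emit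
theorem pvAEmit_eq_pvBScan (ls : List String)
    (h1 : ¬ 2 ≤ ((pvBSplitAtStart ls).1.filter pvHasEnd).length ∨
          ((pvBSplitAtStart ls).1.takeWhile (fun l => !pvHasEnd l)).isEmpty = true) :
    pvAEmit ls = pvBScan (pvBSplitAtStart ls).1 [] (pvBSplitAtStart ls).2.2 := by
  rw [pvBScan_char, pvAEmit]
  simp only [List.nil_append]
  by_cases hE : 0 < ((pvBSplitAtStart ls).1.filter pvHasEnd).length
  · simp only [hE, if_true]
    by_cases hb : ((pvBSplitAtStart ls).1.takeWhile (fun l => !pvHasEnd l)).isEmpty = true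
    · simp [hb]
    · have hn1 : ((pvBSplitAtStart ls).1.filter pvHasEnd).length = 1 := by
        rcases h1 with h1 | h1
        · omega
        · exact absurd h1 hb
      simp [hb, hn1]
  · simp [hE]

theorem pvAChar_eq_pvBLoop_aux : ∀ (n : Nat) (ls : List String), ls.length ≤ n →
    pvBadRest ls = false → pvAChar ls = pvBLoop ls := by
  intro n
  induction n with
  | zero =>
    intro ls hlen h
    have hls : ls = [] := by cases ls <;> simp_all
    subst hls
    rw [pvAChar_unfold, pvBLoop_unfold]
    simp [pvBSplit_nil, pvAEmit, pvBScan]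
  | succ n ih =>
    intro ls hlen h
    rw [pvBadRest_unfold] at h
    simp only [Bool.or_eq_false_iff, Bool.and_eq_false_iff, decide_eq_false_iff_not,
      Bool.not_eq_eq_eq_not, Bool.not_false] at h
    obtain ⟨h1, h2⟩ := h
    rw [pvAChar_unfold, pvBLoop_unfold, pvAEmit_eq_pvBScan ls h1]
    by_cases hdone : (pvBSplitAtStart ls).2.2 = true
    · simp [hdone]
    · have hdone' : (pvBSplitAtStart ls).2.2 = false := by simpa using hdone
      have hrec : pvBadRest (pvBSplitAtStart ls).2.1 = false := by
        rw [if_neg hdone] at h2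
        exact h2
      have hlt := pvBSplit_len_lt ls hdone'
      simp only [hdone', Bool.false_eq_true, if_false]
      rw [ih (pvBSplitAtStart ls).2.1 (by omega) hrec]

theorem pvAChar_eq_pvBLoop (ls : List String) (h : pvBadRest ls = false) :
    pvAChar ls = pvBLoop ls :=
  pvAChar_eq_pvBLoop_aux ls.length ls le_rfl h

-- getD transfer through drop
theorem pvGetD_drop (xs : List String) (n m : Nat) :
    (xs.drop n).getD m "" = xs.getD (n + m) "" := by
  rw [List.getD_eq_getElem?_getD, List.getD_eq_getElem?_getD, List.getElem?_drop]

-- the segment the split produces is the takeWhile over non-START lines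
theorem pvBSplit_seg_takeWhile (ls : List String) :
    (pvBSplitAtStart ls).1 = ls.takeWhile (fun l => !pvHasStart l) := by
  induction ls with
  | nil => simp [pvBSplitAtStart]
  | cons l tl ih =>
    by_cases hs : pvHasStart l = true
    · simp [pvBSplitAtStart, hs, List.takeWhile_cons]
    · have hs' : pvHasStart l = false := by simpa using hs
      simp [pvBSplitAtStart, hs', List.takeWhile_cons, ih]

theorem pvHeadD_of_takeWhile (seg : List String)
    (htw : (seg.takeWhile (fun l => !pvHasEnd l)).isEmpty = false) :
    pvHasEnd (seg.headD "") = false := by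
  cases seg with
  | nil => simp at htw
  | cons a t =>
    by_cases he : pvHasEnd a = true
    · simp [List.takeWhile_cons, he] at htw
    · simpa using he

theorem pvBSplit_index (ls : List String) (h : (pvBSplitAtStart ls).2.2 = false) :
    ∃ i < ls.length, pvHasStart (ls.getD i "") = true ∧
      (pvBSplitAtStart ls).2.1 = ls.drop (i + 1) ∧
      ∀ m < i, pvHasStart (ls.getD m "") = false := by
  induction ls with
  | nil => simp [pvBSplitAtStart] at h
  | cons l tl ih =>
    rw [pvBSplit_cons] at h ⊢
    by_cases hs : pvHasStart l = true
    · exact ⟨0, by simp, by simpa using hs, by simp [hs], by omega⟩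
    · have hs' : pvHasStart l = false := by simpa using hs
      simp only [hs', Bool.false_eq_true, if_false] at h ⊢
      obtain ⟨i, hi, hSi, hdrop, hmin⟩ := ih h
      refine ⟨i + 1, by simpa using Nat.succ_lt_succ hi, by simpa using hSi,
        by simpa using hdrop, ?_⟩
      intro m hm
      cases m with
      | zero => simpa using hs'
      | succ m' => simpa using hmin m' (by omega)

-- proof-side: the D_ condition for the segment at the head of a remainder
def pvDInner (rs : List String) : Prop :=
  pvHasEnd (rs.getD 0 "") = false ∧
    2 ≤ (rs.takeWhile (fun l => !pvHasStart l)).countP pvHasEnd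

theorem pvDInner_of_seg (rs : List String)
    (h2 : 2 ≤ ((rs.takeWhile (fun l => !pvHasStart l)).filter pvHasEnd).length)
    (htw : ((rs.takeWhile (fun l => !pvHasStart l)).takeWhile
      (fun l => !pvHasEnd l)).isEmpty = false) :
    pvDInner rs := by
  have hcnt : 2 ≤ (rs.takeWhile (fun l => !pvHasStart l)).countP pvHasEnd := by
    rw [List.countP_eq_length_filter]
    exact h2
  have hhd := pvHeadD_of_takeWhile _ htw
  refine ⟨?_, hcnt⟩
  cases rs with
  | nil => simp at h2
  | cons a t =>
    by_cases hs : pvHasStart a = true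
    · rw [List.takeWhile_cons, if_neg (by simp [hs])] at h2
      simp at h2
    · have hs' : pvHasStart a = false := by simpa using hs
      rw [List.takeWhile_cons, if_pos (by simp [hs'])] at hhd
      simpa using hhd

theorem pvBadRest_to_D_aux : ∀ (n : Nat) (rs : List String), rs.length ≤ n →
    pvBadRest rs = true →
    pvDInner rs ∨
      ∃ i < rs.length, pvHasStart (rs.getD i "") = true ∧ pvDInner (rs.drop (i + 1)) := by
  intro n
  induction n with
  | zero =>
    intro rs hlen h
    have hrs : rs = [] := by cases rs <;> simp_all
    subst hrs
    rw [pvBadRest_unfold] at h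
    simp [pvBSplitAtStart] at h
  | succ n ih =>
    intro rs hlen h
    rw [pvBadRest_unfold] at h
    rcases Bool.or_eq_true_iff.mp h with hA | hB
    · left
      obtain ⟨h2, htw⟩ := Bool.and_eq_true_iff.mp hA
      rw [pvBSplit_seg_takeWhile] at h2 htw
      exact pvDInner_of_seg rs (by simpa using h2) (by simpa using htw)
    · have hdone : (pvBSplitAtStart rs).2.2 = false := by
        by_contra hc
        rw [if_pos (by simpa using hc)] at hB
        exact absurd hB (by simp)
      rw [if_neg (by simp [hdone])] at hB
      obtain ⟨i0, hi0, hSi0, hdrop, hmin0⟩ := pvBSplit_index rs hdone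
      have hlt := pvBSplit_len_lt rs hdone
      rcases ih (pvBSplitAtStart rs).2.1 (by omega) hB with hH | ⟨i', hi', hSi', hH'⟩
      · right
        exact ⟨i0, hi0, hSi0, by rw [← hdrop]; exact hH⟩
      · right
        rw [hdrop] at hi' hSi' hH'
        rw [List.length_drop] at hi'
        rw [pvGetD_drop] at hSi'
        rw [List.drop_drop] at hH'
        refine ⟨i0 + 1 + i', by omega, hSi', ?_⟩
        rw [show i0 + 1 + i' + 1 = i0 + 1 + (i' + 1) from by omega]
        exact hH'

-- a pvDInner remainder below a START line yields D_
theorem pvD_of_inner (batch_text : String) (i : Nat) (hi : i < (pvLines batch_text).length)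
    (hS : pvHasStart ((pvLines batch_text).getD i "") = true)
    (hH : pvDInner ((pvLines batch_text).drop (i + 1))) :
    D_split_sessions_py batch_text := by
  obtain ⟨hhd, hcnt⟩ := hH
  rw [pvGetD_drop, Nat.add_zero] at hhd
  exact ⟨i, hi, hS, ne_true_of_eq_false hhd, hcnt⟩

-- ¬ D_ transfers to ¬ pvBadRest of the remainder after the first START
theorem not_D_to_not_BadRest (batch_text : String)
    (h : ¬ D_split_sessions_py batch_text)
    (hs : (pvBSplitAtStart (pvLines batch_text)).2.2 = false) :
    pvBadRest (pvBSplitAtStart (pvLines batch_text)).2.1 = false := by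
  by_contra hc
  have hc' : pvBadRest (pvBSplitAtStart (pvLines batch_text)).2.1 = true := by simpa using hc
  obtain ⟨i0, hi0, hSi0, hdrop, hmin0⟩ := pvBSplit_index (pvLines batch_text) hs
  apply h
  rcases pvBadRest_to_D_aux (pvBSplitAtStart (pvLines batch_text)).2.1.length _ le_rfl hc'
    with hH | ⟨i', hi', hSi', hH'⟩
  · rw [hdrop] at hH
    exact pvD_of_inner batch_text i0 hi0 hSi0 hH
  · rw [hdrop] at hi' hSi' hH'
    rw [List.length_drop] at hi'
    rw [pvGetD_drop] at hSi'
    rw [List.drop_drop] at hH'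
    rw [show i0 + 1 + (i' + 1) = i0 + 1 + i' + 1 from by omega] at hH'
    exact pvD_of_inner batch_text (i0 + 1 + i') (by omega) hSi' hH'

-- if no START is found, the list has no START line
theorem pvBSplit_done_noS (ls : List String) (h : (pvBSplitAtStart ls).2.2 = true) :
    ∀ l ∈ ls, pvHasStart l = false := by
  induction ls with
  | nil => simp
  | cons l tl ih =>
    rw [pvBSplit_cons] at h
    by_cases hs : pvHasStart l = true
    · simp [hs] at h
    · have hs' : pvHasStart l = false := by simpa using hs
      simp only [hs', Bool.false_eq_true, if_false] at h
      intro x hx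
      rcases List.mem_cons.mp hx with hx | hx
      · subst hx; exact hs'
      · exact ih h x hx

-- a START line somewhere means the split finds one
theorem pvBSplit_not_done (ls : List String) (i : Nat) (hi : i < ls.length)
    (hS : pvHasStart (ls.getD i "") = true) : (pvBSplitAtStart ls).2.2 = false := by
  by_contra hc
  have hc' : (pvBSplitAtStart ls).2.2 = true := by simpa using hc
  have hm : ls.getD i "" ∈ ls := by
    rw [List.getD_eq_getElem _ _ hi]
    exact List.getElem_mem _
  rw [pvBSplit_done_noS ls hc' _ hm] at hS
  exact Bool.false_ne_true hS

-- pvDInner at the head of a remainder is the first disjunct of pvBadRest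
theorem pvBadRest_of_inner (rs : List String) (h : pvDInner rs) : pvBadRest rs = true := by
  obtain ⟨hhd, hcnt⟩ := h
  rw [pvBadRest_unfold, Bool.or_eq_true_iff]
  left
  rw [Bool.and_eq_true_iff]
  rw [pvBSplit_seg_takeWhile]
  have h2 : 2 ≤ ((rs.takeWhile (fun l => !pvHasStart l)).filter pvHasEnd).length := by
    rw [← List.countP_eq_length_filter]
    exact hcnt
  refine ⟨by simpa using h2, ?_⟩
  cases rs with
  | nil => simp at h2
  | cons a t =>
    by_cases hs : pvHasStart a = true
    · rw [List.takeWhile_cons, if_neg (by simp [hs])] at h2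
      simp at h2
    · have hs' : pvHasStart a = false := by simpa using hs
      have hE : pvHasEnd a = false := by simpa using hhd
      rw [List.takeWhile_cons, if_pos (by simp [hs'])]
      simp [List.takeWhile_cons, hE]

-- a START followed by a pvDInner remainder forces pvBadRest past the first START
theorem pvD_to_BadRest_aux : ∀ (n : Nat) (rs : List String), rs.length ≤ n →
    (∃ i < rs.length, pvHasStart (rs.getD i "") = true ∧ pvDInner (rs.drop (i + 1))) →
    (pvBSplitAtStart rs).2.2 = false ∧ pvBadRest (pvBSplitAtStart rs).2.1 = true := by
  intro n
  induction n with
  | zero =>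
    intro rs hlen h
    obtain ⟨i, hi, _⟩ := h
    omega
  | succ n ih =>
    intro rs hlen ⟨i, hi, hS, hinner⟩
    have hdone := pvBSplit_not_done rs i hi hS
    refine ⟨hdone, ?_⟩
    obtain ⟨i0, hi0, hSi0, hdrop, hmin0⟩ := pvBSplit_index rs hdone
    have hle : i0 ≤ i := by
      by_contra hc
      rw [hmin0 i (by omega)] at hS
      exact Bool.false_ne_true hS
    rw [hdrop]
    rcases Nat.eq_or_lt_of_le hle with heq | hlt
    · subst heq
      exact pvBadRest_of_inner _ hinner
    · have hlt0 := pvBSplit_len_lt rs hdone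
      have hbad : pvBadRest (pvBSplitAtStart (rs.drop (i0 + 1))).2.1 = true := by
        refine (ih (rs.drop (i0 + 1)) (by rw [List.length_drop]; omega)
          ⟨i - (i0 + 1), by rw [List.length_drop]; omega, ?_, ?_⟩).2
        · rw [pvGetD_drop, show i0 + 1 + (i - (i0 + 1)) = i from by omega]
          exact hS
        · rw [List.drop_drop, show i0 + 1 + (i - (i0 + 1) + 1) = i + 1 from by omega]
          exact hinner
      have hdone2 : (pvBSplitAtStart (rs.drop (i0 + 1))).2.2 = false := by
        refine pvBSplit_not_done _ (i - (i0 + 1)) (by rw [List.length_drop]; omega) ?_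
        rw [pvGetD_drop, show i0 + 1 + (i - (i0 + 1)) = i from by omega]
        exact hS
      rw [pvBadRest_unfold, Bool.or_eq_true_iff]
      right
      rw [if_neg (by simp [hdone2])]
      exact hbad

-- B's loop never emits more than A's characterisation; strictly fewer on a bad remainder
theorem pvLen_lemma : ∀ (n : Nat) (rs : List String), rs.length ≤ n →
    (pvBLoop rs).length ≤ (pvAChar rs).length ∧
      (pvBadRest rs = true → (pvBLoop rs).length < (pvAChar rs).length) := by
  intro n
  induction n with
  | zero =>
    intro rs hlen
    have hrs : rs = [] := by cases rs <;> simp_all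
    subst hrs
    constructor
    · rw [pvAChar_unfold, pvBLoop_unfold]
      simp [pvBSplit_nil, pvAEmit, pvBScan]
    · intro hbad
      rw [pvBadRest_unfold] at hbad
      simp [pvBSplitAtStart] at hbad
  | succ n ih =>
    intro rs hlen
    have hEmit : (pvBScan (pvBSplitAtStart rs).1 [] (pvBSplitAtStart rs).2.2).length ≤
        (pvAEmit rs).length := by
      rw [pvBScan_char, pvAEmit]
      by_cases hE : 0 < ((pvBSplitAtStart rs).1.filter pvHasEnd).length
      · by_cases hb : ((pvBSplitAtStart rs).1.takeWhile (fun l => !pvHasEnd l)).isEmpty = true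
        · simp [hE, hb]
        · simp only [hE, if_true, List.nil_append]
          have hb' : ((pvBSplitAtStart rs).1.takeWhile (fun l => !pvHasEnd l)).isEmpty = false := by
            simpa using hb
          simp [hb', List.length_replicate]
          omega
      · simp [hE]
    have hStrict : 2 ≤ ((pvBSplitAtStart rs).1.filter pvHasEnd).length →
        ((pvBSplitAtStart rs).1.takeWhile (fun l => !pvHasEnd l)).isEmpty = false →
        (pvBScan (pvBSplitAtStart rs).1 [] (pvBSplitAtStart rs).2.2).length <
          (pvAEmit rs).length := by
      intro h2 htw
      rw [pvBScan_char, pvAEmit]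
      simp only [show 0 < ((pvBSplitAtStart rs).1.filter pvHasEnd).length from by omega, if_true,
        List.nil_append]
      simp [htw, List.length_replicate]
      omega
    rw [pvAChar_unfold, pvBLoop_unfold]
    by_cases hdone : (pvBSplitAtStart rs).2.2 = true
    · rw [if_pos hdone, if_pos hdone]
      refine ⟨hEmit, ?_⟩
      intro hbad
      rw [pvBadRest_unfold, Bool.or_eq_true_iff] at hbad
      rcases hbad with hA | hB
      · obtain ⟨h2, htw⟩ := Bool.and_eq_true_iff.mp hA
        exact hStrict (by simpa using h2) (by simpa using htw)
      · rw [if_pos hdone] at hB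
        exact absurd hB (by simp)
    · rw [if_neg hdone, if_neg hdone]
      have hdone' : (pvBSplitAtStart rs).2.2 = false := by simpa using hdone
      have hlt := pvBSplit_len_lt rs hdone'
      obtain ⟨ihle, ihlt⟩ := ih (pvBSplitAtStart rs).2.1 (by omega)
      rw [List.length_append, List.length_append]
      refine ⟨by omega, ?_⟩
      intro hbad
      rw [pvBadRest_unfold, Bool.or_eq_true_iff] at hbad
      rcases hbad with hA | hB
      · obtain ⟨h2, htw⟩ := Bool.and_eq_true_iff.mp hA
        have := hStrict (by simpa using h2) (by simpa using htw)
        omega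
      · rw [if_neg hdone] at hB
        have := ihlt hB
        omega

-- ===== VERDICT (by name: the statement is the Claim_ definition above) =====
theorem split_sessions_py_spec : Claim_unchanged_split_sessions_py := by
  intro batch_text _ hD
  unfold split_sessions_py split_sessions_py_alt
  rw [(pvALoop_main (pvLines batch_text)).2 []]
  rw [pvFGen]
  by_cases hs : (pvBSplitAtStart (pvLines batch_text)).2.2 = true
  · simp [hs]
  · have hs' : (pvBSplitAtStart (pvLines batch_text)).2.2 = false := by simpa using hs
    simp only [List.isEmpty_nil, hs', Bool.false_eq_true, if_false, List.nil_append]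
    exact pvAChar_eq_pvBLoop _ (not_D_to_not_BadRest batch_text hD hs')

theorem split_sessions_py_changed : Claim_changed_split_sessions_py := by
  unfold Claim_changed_split_sessions_py
  refine ⟨by decide, by decide, by decide, ?_, by decide⟩
  show split_sessions_py_alt pvDiffWitness_split_sessions_py = ["x"]
  unfold split_sessions_py_alt
  rw [show pvLines pvDiffWitness_split_sessions_py =
      ["###--- SESSION START ---###", "x", "###--- SESSION END ---###",
       "###--- SESSION END ---###"] from by decide]
  simp only [show pvBSplitAtStart
      ["###--- SESSION START ---###", "x", "###--- SESSION END ---###",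
       "###--- SESSION END ---###"] =
      ([], ["x", "###--- SESSION END ---###", "###--- SESSION END ---###"], false) from by decide,
    Bool.false_eq_true, if_false]
  rw [pvBLoop.eq_def]
  simp only [show pvBSplitAtStart
      ["x", "###--- SESSION END ---###", "###--- SESSION END ---###"] =
      (["x", "###--- SESSION END ---###", "###--- SESSION END ---###"], [], true) from by decide]
  decide

theorem split_sessions_py_tight : Claim_exact_split_sessions_py := by
  intro batch_text _ hD
  obtain ⟨i, hi, hS, hEn, hcnt⟩ := hD
  have hS' : pvHasStart ((pvLines batch_text).getD i "") = true := hS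
  have hinner : pvDInner ((pvLines batch_text).drop (i + 1)) := by
    refine ⟨?_, hcnt⟩
    rw [pvGetD_drop, Nat.add_zero]
    simpa using hEn
  obtain ⟨hdone, hbad⟩ := pvD_to_BadRest_aux (pvLines batch_text).length (pvLines batch_text)
    le_rfl ⟨i, hi, hS', hinner⟩
  have hlen := (pvLen_lemma (pvBSplitAtStart (pvLines batch_text)).2.1.length _ le_rfl).2 hbad
  intro hEq
  unfold split_sessions_py split_sessions_py_alt at hEq
  rw [(pvALoop_main (pvLines batch_text)).2 [], pvFGen] at hEq
  simp only [List.isEmpty_nil, if_true, hdone, Bool.false_eq_true, if_false,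
    List.nil_append] at hEq
  rw [hEq] at hlen
  omega
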